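-- pv_equiv track=rewrite | github.com/MajoorWaldi/ComfyUI-Majoor-AssetsManager | backend/features/geninfo/parser.py | _clean_model_id
-- ===== SOURCE A (Python) =====
-- from typing import Any, Dict, List, Optional, Set, Tuple
--
-- _MODEL_EXTS: Tuple[str, ...] = (
--     ".safetensors",
--     ".ckpt",
--     ".pt",
--     ".pth",
--     ".bin",
--     ".gguf",
--     ".json",
-- )
--
-- def _clean_model_id(value: Any) -> Optional[str]:
--     if value is None:
--         return None
--     s = str(value).strip()
--     if not s:
--         return None
--     s = s.replace("\\", "/")
--     s = s.split("/")[-1]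
--     lower = s.lower()
--     for ext in _MODEL_EXTS:
--         if lower.endswith(ext):
--             return s[: -len(ext)]
--     return s
-- ===== SOURCE B (Python) =====
-- from typing import Any, Optional
--
-- _MODEL_EXT_NAMES = {"safetensors", "ckpt", "pt", "pth", "bin", "gguf", "json"}
--
-- def _clean_model_id(value: Any) -> Optional[str]:
--     if value is None:
--         return None
--     s = str(value).strip()
--     if not s:
--         return None
--     base = s.replace("\\", "/").split("/")[-1]
--     name, dot, suffix = base.rpartition(".")
--     if dot and suffix.lower() in _MODEL_EXT_NAMES:
--         return name
--     return base
-- ===== Notes on version B (the rewrite author's own statement) =====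
-- stated objective: idiomatic
-- what changed: B replaces A's linear scan over the 7-tuple of extensions with endswith tests by a single rpartition at the last dot followed by one set-membership lookup of the lowercased suffix.
import Mathlib
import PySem

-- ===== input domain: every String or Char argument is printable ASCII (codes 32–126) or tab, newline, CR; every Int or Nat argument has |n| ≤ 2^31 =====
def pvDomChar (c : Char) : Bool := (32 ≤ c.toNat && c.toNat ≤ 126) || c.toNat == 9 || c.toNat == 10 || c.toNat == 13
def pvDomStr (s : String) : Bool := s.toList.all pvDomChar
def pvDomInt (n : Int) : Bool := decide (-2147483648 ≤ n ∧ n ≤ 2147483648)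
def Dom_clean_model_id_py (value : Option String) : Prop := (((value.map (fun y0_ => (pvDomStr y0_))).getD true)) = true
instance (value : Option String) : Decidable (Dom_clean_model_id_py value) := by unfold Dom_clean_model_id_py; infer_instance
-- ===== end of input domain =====

-- B replaces A's linear endswith-scan over the extension tuple by one rpartition at the last dot
-- plus a single set-membership test on the lowercased suffix (objective: idiomatic).

-- ===== PORT A =====
def pvModelExts : List (List Char) :=
  [".safetensors".toList, ".ckpt".toList, ".pt".toList, ".pth".toList,
   ".bin".toList, ".gguf".toList, ".json".toList]

-- the 'for ext in _MODEL_EXTS' loop: first matching ext wins, s[:-len(ext)] is a Python slice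
def pvCleanLoop (s lower : List Char) : List (List Char) → List Char
  | [] => s
  | ext :: rest =>
    if PySem.Chars.endswith lower ext then PySem.List.slice s none (some (-(ext.length : Int)))
    else pvCleanLoop s lower rest

def clean_model_id_py (value : Option String) : Option String :=
  match value with
  | none => none
  | some v =>
    let s := PySem.Chars.strip v.toList
    if s = [] then none
    else
      let s := PySem.Chars.replace s ['\\'] ['/']
      -- s.split("/")[-1]: split on a nonempty separator is never empty, so [-1] never raises
      let s := (PySem.List.pyGet? (PySem.Chars.splitOn s ['/']) (-1)).getD []
      let lower := PySem.Chars.lower s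
      some (String.ofList (pvCleanLoop s lower pvModelExts))

-- ===== PORT B =====
def pvModelExtNames : List (List Char) :=
  ["safetensors".toList, "ckpt".toList, "pt".toList, "pth".toList,
   "bin".toList, "gguf".toList, "json".toList]

def clean_model_id_py_alt (value : Option String) : Option String :=
  match value with
  | none => none
  | some v =>
    let s := PySem.Chars.strip v.toList
    if s = [] then none
    else
      let base := (PySem.List.pyGet? (PySem.Chars.splitOn (PySem.Chars.replace s ['\\'] ['/']) ['/']) (-1)).getD []
      -- base.rpartition('.') ported by hand (exact): the suffix after the LAST '.' is the
      -- reversed takeWhile of the reversed list; 'dot' is truthy iff a '.' was found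
      let revl := base.reverse
      let sufRev := revl.takeWhile (· != '.')
      if sufRev.length < revl.length && pvModelExtNames.contains (PySem.Chars.lower sufRev.reverse) then
        some (String.ofList ((revl.drop (sufRev.length + 1)).reverse))
      else
        some (String.ofList base)

-- ===== PRECONDITION & SPEC =====
def Spec_clean_model_id_py (value : Option String) (out : Option String) : Prop := out = clean_model_id_py_alt value
instance (value : Option String) (out : Option String) : Decidable (Spec_clean_model_id_py value out) := by unfold Spec_clean_model_id_py; infer_instance

-- ===== CLAIM (what is proved, stated in full; the proofs are below) =====
def Claim_equal_clean_model_id_py : Prop := ∀ (value : Option String), Dom_clean_model_id_py value → Spec_clean_model_id_py value (clean_model_id_py value)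

-- ===== LEMMAS AND PROOFS =====

lemma lowerChar_eq_dot (c : Char) : PySem.Chars.lowerChar c = '.' ↔ c = '.' := by
  simp only [PySem.Chars.lowerChar, PySem.Chars.isupper]
  split_ifs with h
  · simp only [Bool.and_eq_true, decide_eq_true_eq, Char.le_def] at h
    have hA : (65:Nat) ≤ c.toNat := by have := h.1; simpa using this
    have hZ : c.toNat ≤ 90 := by have := h.2; simpa using this
    constructor
    · intro he
      exfalso
      have h2 : (Char.ofNat (c.toNat + 32)).toNat = ('.' : Char).toNat := by rw [he]
      have hv : (c.toNat+32).isValidChar := Or.inl (by omega)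
      rw [Char.toNat_ofNat, if_pos hv] at h2
      have h46 : ('.':Char).toNat = 46 := by decide
      omega
    · intro he; exact absurd h (by subst he; decide)
  · rfl

lemma pv_prefix_dot (t : List Char) : ∀ (u : List Char), '.' ∉ u →
    ((u ++ ['.']) <+: t.map PySem.Chars.lowerChar ↔
      ((t.takeWhile (· != '.')).map PySem.Chars.lowerChar = u ∧ '.' ∈ t)) := by
  induction t with
  | nil => intro u hu; simp
  | cons c t ih =>
    intro u hu
    cases u with
    | nil =>
      simp only [List.nil_append, List.map_cons]
      constructor
      · rintro ⟨rest, hrest⟩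
        have hc : PySem.Chars.lowerChar c = '.' := by
          have := congrArg (fun l => l.headI) hrest
          simpa using this.symm
        have hc' : c = '.' := (lowerChar_eq_dot c).1 hc
        subst hc'
        simp [List.takeWhile]
      · rintro ⟨h1, _⟩
        by_cases hc : c = '.'
        · subst hc; exact ⟨_, rfl⟩
        · exfalso
          have : (c :: t).takeWhile (· != '.') = c :: t.takeWhile (· != '.') := by
            simp [hc]
          rw [this] at h1; simp at h1
    | cons a u' =>
      have ha : a ≠ '.' := by intro h; exact hu (by simp [h])
      have hu' : '.' ∉ u' := fun h => hu (by simp [h])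
      by_cases hc : c = '.'
      · subst hc
        constructor
        · rintro ⟨rest, hrest⟩
          exfalso
          have : PySem.Chars.lowerChar '.' = a := by
            have := congrArg (fun l => l.headI) hrest
            simpa using this.symm
          rw [show PySem.Chars.lowerChar '.' = '.' from (lowerChar_eq_dot '.').2 rfl] at this
          exact ha this.symm
        · rintro ⟨h1, _⟩
          exfalso
          have : ('.' :: t).takeWhile (· != '.') = [] := by simp
          rw [this] at h1; simp at h1
      · have htw : (c :: t).takeWhile (· != '.') = c :: t.takeWhile (· != '.') := by
          simp [hc]
        rw [htw]
        simp only [List.map_cons, List.cons_append, List.cons_prefix_cons, List.mem_cons]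
        rw [ih u' hu']
        constructor
        · rintro ⟨h1, h2, h3⟩; exact ⟨by rw [h1, h2], Or.inr h3⟩
        · rintro ⟨h1, h2⟩
          injection h1 with ha' hu''
          refine ⟨ha'.symm, hu'', ?_⟩
          rcases h2 with h2 | h2
          · exact absurd h2.symm hc
          · exact h2

lemma pv_endswith (s w : List Char) (hw : '.' ∉ w) :
    PySem.Chars.endswith (PySem.Chars.lower s) ('.' :: w) = true ↔
      ((s.reverse.takeWhile (· != '.')).map PySem.Chars.lowerChar = w.reverse ∧ '.' ∈ s) := by
  rw [PySem.Chars.endswith_iff]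
  have h1 : ('.' :: w) <:+ PySem.Chars.lower s ↔
      (('.' :: w).reverse <+: (PySem.Chars.lower s).reverse) := by
    exact (List.reverse_prefix).symm
  rw [h1]
  simp only [List.reverse_cons, PySem.Chars.lower]
  rw [← List.map_reverse]
  rw [pv_prefix_dot s.reverse w.reverse (by simpa using hw)]
  simp

lemma pv_tw_lt (l : List Char) : (l.takeWhile (· != '.')).length < l.length ↔ '.' ∈ l := by
  constructor
  · intro h
    by_contra hd
    have : l.takeWhile (· != '.') = l := by
      rw [List.takeWhile_eq_self_iff]
      intro x hx
      simp only [bne_iff_ne, ne_eq]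
      intro he; exact hd (he ▸ hx)
    rw [this] at h; omega
  · intro hd
    have hle := (List.takeWhile_sublist (p := (· != '.')) (l := l)).length_le
    rcases Nat.lt_or_ge (l.takeWhile (· != '.')).length l.length with h | h
    · exact h
    · exfalso
      have heq : l.takeWhile (· != '.') = l := by
        apply List.Sublist.eq_of_length (List.takeWhile_sublist _)
        omega
      have := (List.takeWhile_eq_self_iff).1 heq '.' hd
      simp at this

lemma pv_slice_neg (l : List Char) (n : Nat) (h0 : 0 < n) (hn : n ≤ l.length) :
    PySem.List.slice l none (some (-(n : Int))) = l.take (l.length - n) := by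
  simp only [PySem.List.slice, PySem.List.clampIdx]
  have hneg : (-(n:Int)) < 0 := by omega
  rw [if_pos hneg]
  have h2 : ¬ ((l.length : Int) + -(n:Int) < 0) := by omega
  rw [if_neg h2]
  have h3 : ((l.length : Int) + -(n:Int)).toNat = l.length - n := by omega
  rw [h3]
  simp

lemma pv_rev_drop (l : List Char) (n : Nat) :
    (l.reverse.drop n).reverse = l.take (l.length - n) := by
  rw [List.reverse_drop]
  simp

lemma pv_core (base : List Char) (names : List (List Char))
    (hnames : ∀ n ∈ names, '.' ∉ n) :
    pvCleanLoop base (PySem.Chars.lower base) (names.map ('.' :: ·)) =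
      (if (base.reverse.takeWhile (· != '.')).length < base.reverse.length
            && names.contains (PySem.Chars.lower (base.reverse.takeWhile (· != '.')).reverse) then
        (base.reverse.drop ((base.reverse.takeWhile (· != '.')).length + 1)).reverse
      else base) := by
  induction names with
  | nil => simp [pvCleanLoop]
  | cons n rest ih =>
    have hn : '.' ∉ n := hnames n (by simp)
    have hrest : ∀ m ∈ rest, '.' ∉ m := fun m hm => hnames m (by simp [hm])
    simp only [List.map_cons, pvCleanLoop]
    by_cases hc : PySem.Chars.endswith (PySem.Chars.lower base) ('.' :: n) = true
    · rw [if_pos hc]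
      obtain ⟨hu, hdot⟩ := (pv_endswith base n hn).1 hc
      have hdot' : '.' ∈ base.reverse := by simpa using hdot
      have hlt : (base.reverse.takeWhile (· != '.')).length < base.reverse.length :=
        (pv_tw_lt base.reverse).2 hdot'
      have hlen : (base.reverse.takeWhile (· != '.')).length = n.length := by
        have := congrArg List.length hu
        simpa using this
      have hmem : PySem.Chars.lower (base.reverse.takeWhile (· != '.')).reverse = n := by
        have : PySem.Chars.lower (base.reverse.takeWhile (· != '.')).reverse
            = ((base.reverse.takeWhile (· != '.')).map PySem.Chars.lowerChar).reverse := by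
          simp [PySem.Chars.lower, List.map_reverse]
        rw [this, hu, List.reverse_reverse]
      rw [if_pos]
      · have hlens : (('.' :: n).length : Int) = ((n.length + 1 : Nat) : Int) := by simp
        rw [hlens, pv_slice_neg base (n.length + 1) (by omega)
            (by rw [List.length_reverse] at hlt; omega)]
        rw [pv_rev_drop, hlen]
      · simp only [Bool.and_eq_true, decide_eq_true_eq]
        constructor
        · exact hlt
        · rw [hmem]; simp
    · rw [if_neg hc, ih hrest]
      congr 1
      by_cases hlt : (base.reverse.takeWhile (· != '.')).length < base.reverse.length
      · have hdot : '.' ∈ base := by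
          have := (pv_tw_lt base.reverse).1 hlt
          simpa using this
        have hne : PySem.Chars.lower (base.reverse.takeWhile (· != '.')).reverse ≠ n := by
          intro he
          apply hc
          rw [pv_endswith base n hn]
          refine ⟨?_, hdot⟩
          have : ((base.reverse.takeWhile (· != '.')).map PySem.Chars.lowerChar).reverse = n := by
            rw [← he]; simp [PySem.Chars.lower, List.map_reverse]
          rw [← this, List.reverse_reverse]
        simp only [List.contains_cons]
        have : ((PySem.Chars.lower (base.reverse.takeWhile (· != '.')).reverse) == n) = false := by
          simpa using hne
        rw [this]
        simp
      · simp only [] at *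
        have : (decide ((base.reverse.takeWhile (· != '.')).length < base.reverse.length)) = false := by
          simpa using hlt
        rw [this]
        simp

lemma pv_exts_eq : pvModelExts = pvModelExtNames.map ('.' :: ·) := rfl

lemma pv_names_no_dot : ∀ n ∈ pvModelExtNames, '.' ∉ n := by
  intro n hn
  fin_cases hn <;> decide

-- ===== VERDICT (by name: the statement is the Claim_ definition above) =====
theorem clean_model_id_py_spec : Claim_equal_clean_model_id_py := by
  intro value _
  cases value with
  | none => rfl
  | some v =>
    simp only [Spec_clean_model_id_py, clean_model_id_py, clean_model_id_py_alt]
    by_cases hs : PySem.Chars.strip v.toList = []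
    · rw [if_pos hs, if_pos hs]
    · rw [if_neg hs, if_neg hs]
      have h := pv_core ((PySem.List.pyGet? (PySem.Chars.splitOn (PySem.Chars.replace (PySem.Chars.strip v.toList) ['\\'] ['/']) ['/']) (-1)).getD []) pvModelExtNames pv_names_no_dot
      rw [← pv_exts_eq] at h
      rw [h]
      split <;> rfl
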